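-- pv_equiv track=rewrite | github.com/ArthurMor4is/advent-of-code | 2023/p7/part_2.py | get_max_valid_key
-- ===== SOURCE A (Python) =====
-- def get_max_valid_key(frequency):
--     result = None
--     max_value = -float("inf")
--     for key, value in frequency.items():
--         if value > max_value and key != "J":
--             result = key
--             max_value = value
--     return result
-- ===== SOURCE B (Python) =====
-- def get_max_valid_key(frequency):
--     items = [kv for kv in frequency.items() if kv[0] != "J"]
--     if not items:
--         return None
--     return sorted(items, key=lambda kv: kv[1], reverse=True)[0][0]
-- ===== Notes on version B (the rewrite author's own statement) =====
-- stated objective: alternative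
-- what changed: Replaces the single running-argmax scan (tracking result and max_value) with filter-out-'J' followed by a stable descending sort by value, returning the first sorted item's key (None if nothing remains).
import Mathlib
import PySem

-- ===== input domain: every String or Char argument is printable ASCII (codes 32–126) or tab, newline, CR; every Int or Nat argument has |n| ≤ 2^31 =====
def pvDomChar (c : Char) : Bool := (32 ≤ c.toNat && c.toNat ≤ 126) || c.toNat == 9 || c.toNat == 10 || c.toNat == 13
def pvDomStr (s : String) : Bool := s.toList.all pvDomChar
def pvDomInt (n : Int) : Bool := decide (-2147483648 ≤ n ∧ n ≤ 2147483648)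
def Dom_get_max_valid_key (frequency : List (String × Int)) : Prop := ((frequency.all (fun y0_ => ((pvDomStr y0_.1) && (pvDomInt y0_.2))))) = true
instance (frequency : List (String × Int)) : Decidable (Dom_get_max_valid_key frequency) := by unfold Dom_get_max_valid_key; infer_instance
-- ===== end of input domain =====

-- B replaces A's running-argmax scan with filter-then-stable-descending-sort and head; same return value, no speed claim.

-- ===== PORT A =====
-- loop body of A: max_value starts at -inf, modelled as `none`; `value > max_value and key != "J"`.
def gmvkStep (st : Option String × Option Int) (kv : String × Int) : Option String × Option Int :=
  if ((match st.2 with | none => true | some m => decide (m < kv.2)) && (kv.1 != "J")) = true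
  then (some kv.1, some kv.2) else st

def get_max_valid_key (frequency : List (String × Int)) : Option String :=
  (frequency.foldl gmvkStep (none, none)).1

-- ===== PORT B =====
def get_max_valid_key_alt (frequency : List (String × Int)) : Option String :=
  let items := frequency.filter (fun kv => kv.1 != "J")
  match PySem.List.sorted items (fun kv => kv.2) true with
  | [] => none
  | h :: _ => some h.1

-- ===== PRECONDITION & SPEC =====
def Spec_get_max_valid_key (frequency : List (String × Int)) (out : Option String) : Prop := out = get_max_valid_key_alt frequency
instance (frequency : List (String × Int)) (out : Option String) : Decidable (Spec_get_max_valid_key frequency out) := by unfold Spec_get_max_valid_key; infer_instance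

-- ===== CLAIM (what is proved, stated in full; the proofs are below) =====
def Claim_equal_get_max_valid_key : Prop := ∀ (frequency : List (String × Int)), Dom_get_max_valid_key frequency → Spec_get_max_valid_key frequency (get_max_valid_key frequency)

-- ===== LEMMAS AND PROOFS =====

-- A's step ignores "J" entries, so the fold over the list equals the fold over the filtered list.
lemma gmvk_foldl_filter (xs : List (String × Int)) (st : Option String × Option Int) :
    xs.foldl gmvkStep st = (xs.filter (fun kv => kv.1 != "J")).foldl gmvkStep st := by
  induction xs generalizing st with
  | nil => rfl
  | cons x xs ih =>
    rw [List.filter_cons]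
    by_cases hx : (x.1 != "J") = true
    · simp only [hx, if_true, List.foldl]
      exact ih _
    · have hxJ : x.1 = "J" := by simpa using hx
      have hstep : gmvkStep st x = st := by
        simp only [gmvkStep]
        rw [if_neg]
        simp [hxJ]
      simp only [hx, List.foldl, hstep]
      exact ih _

-- Invariant tying A's state to the head of the stable descending insertion-sort accumulator.
def gmvkInv (s : List (String × Int)) (st : Option String × Option Int) : Prop :=
  (s = [] ∧ st.1 = none ∧ st.2 = none) ∨ ∃ h t, s = h :: t ∧ st.1 = some h.1 ∧ st.2 = some h.2

lemma gmvk_main (ys : List (String × Int)) (s : List (String × Int))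
    (r : Option String) (m : Option Int)
    (hJ : ∀ kv ∈ ys, (kv.1 != "J") = true)
    (hinv : gmvkInv s (r, m)) :
    gmvkInv (ys.foldl (fun acc x => PySem.List.insertBy (fun a b => decide (b.2 < a.2)) x acc) s)
      (ys.foldl gmvkStep (r, m)) := by
  induction ys generalizing s r m with
  | nil => simpa using hinv
  | cons x ys ih =>
    have hxJ : (x.1 != "J") = true := hJ x (by simp)
    have hJ' : ∀ kv ∈ ys, (kv.1 != "J") = true := fun kv hkv => hJ kv (by simp [hkv])
    simp only [List.foldl]
    rcases hinv with ⟨hs, hr, hm⟩ | ⟨h, t, hs, hr, hm⟩ <;> simp only at hr hm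
    · subst hs
      have hins : PySem.List.insertBy (fun a b => decide (b.2 < a.2)) x [] = [x] := by
        simpa using PySem.List.insertBy_of_forall_not_before _ x [] (by simp)
      have hstep : gmvkStep (r, m) x = (some x.1, some x.2) := by
        simp only [gmvkStep, hm]
        rw [if_pos]
        simp [hxJ]
      rw [hins, hstep]
      exact ih [x] _ _ hJ' (Or.inr ⟨x, [], rfl, rfl, rfl⟩)
    · subst hs
      by_cases hlt : h.2 < x.2
      · have hins : PySem.List.insertBy (fun a b => decide (b.2 < a.2)) x (h :: t) = x :: h :: t := by
          simp [PySem.List.insertBy, hlt]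
        have hstep : gmvkStep (r, m) x = (some x.1, some x.2) := by
          simp only [gmvkStep, hm]
          rw [if_pos]
          simp [hxJ, hlt]
        rw [hins, hstep]
        exact ih _ _ _ hJ' (Or.inr ⟨x, h :: t, rfl, rfl, rfl⟩)
      · have hins : PySem.List.insertBy (fun a b => decide (b.2 < a.2)) x (h :: t)
            = h :: PySem.List.insertBy (fun a b => decide (b.2 < a.2)) x t := by
          simp [PySem.List.insertBy, hlt]
        have hstep : gmvkStep (r, m) x = (r, m) := by
          simp only [gmvkStep, hm]
          rw [if_neg]
          simp [hlt]
        rw [hins, hstep]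
        exact ih _ _ _ hJ' (Or.inr ⟨h, _, rfl, hr, hm⟩)

-- ===== VERDICT (by name: the statement is the Claim_ definition above) =====
theorem get_max_valid_key_spec : Claim_equal_get_max_valid_key := by
  intro frequency _
  unfold Spec_get_max_valid_key get_max_valid_key get_max_valid_key_alt
  show (frequency.foldl gmvkStep (none, none)).1
      = match PySem.List.sorted (frequency.filter (fun kv => kv.1 != "J")) (fun kv => kv.2) true with
        | [] => none
        | h :: _ => some h.1
  have hJ : ∀ kv ∈ frequency.filter (fun kv => kv.1 != "J"), (kv.1 != "J") = true := by
    intro kv hkv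
    exact (List.mem_filter.mp hkv).2
  have hmain := gmvk_main (frequency.filter (fun kv => kv.1 != "J")) [] none none hJ
    (Or.inl ⟨rfl, rfl, rfl⟩)
  rw [gmvk_foldl_filter]
  rw [PySem.List.sorted_rev_eq_foldl_insertBy (frequency.filter (fun kv => kv.1 != "J")) (fun kv => kv.2)]
  rcases hmain with ⟨hs, hr, _⟩ | ⟨h, t, hs, hr, _⟩ <;> rw [hs, hr]
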